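-- pv_equiv track=rewrite | github.com/Seeed-Studio/Linux_for_Tegra | bootloader/dtbcheck.py | __check_avfs_freq_list
-- ===== SOURCE A (Python) =====
-- def __check_avfs_freq_list(x, fmin, fmax):
--     fprev = -1
--     for f in x:
--         if f > 10000000000 or f <= fprev:
--             return False
--         fprev = f
--     if fmin and not fmin[0] in x:
--         return False
--     if fmax and not fmax[0] in x:
--         return False
--     return True
-- ===== SOURCE B (Python) =====
-- def __check_avfs_freq_list(x, fmin, fmax):
--     # single pass: validate monotonic/bounded, and tick off the pending
--     # min/max targets as they are encountered (None = nothing pending)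
--     want_min = fmin[0] if fmin else None
--     want_max = fmax[0] if fmax else None
--     fprev = -1
--     for f in x:
--         if not (fprev < f <= 10000000000):
--             return False
--         fprev = f
--         if f == want_min:
--             want_min = None
--         if f == want_max:
--             want_max = None
--     return want_min is None and want_max is None
-- ===== Notes on version B (the rewrite author's own statement) =====
-- stated objective: alternative
-- what changed: B makes one fused pass: instead of A's post-loop membership scans 'fmin[0] in x'/'fmax[0] in x', B carries pending min/max targets (Option-style, cleared to None when encountered) through the validation loop and checks both are cleared at the end.
import Mathlib
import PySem

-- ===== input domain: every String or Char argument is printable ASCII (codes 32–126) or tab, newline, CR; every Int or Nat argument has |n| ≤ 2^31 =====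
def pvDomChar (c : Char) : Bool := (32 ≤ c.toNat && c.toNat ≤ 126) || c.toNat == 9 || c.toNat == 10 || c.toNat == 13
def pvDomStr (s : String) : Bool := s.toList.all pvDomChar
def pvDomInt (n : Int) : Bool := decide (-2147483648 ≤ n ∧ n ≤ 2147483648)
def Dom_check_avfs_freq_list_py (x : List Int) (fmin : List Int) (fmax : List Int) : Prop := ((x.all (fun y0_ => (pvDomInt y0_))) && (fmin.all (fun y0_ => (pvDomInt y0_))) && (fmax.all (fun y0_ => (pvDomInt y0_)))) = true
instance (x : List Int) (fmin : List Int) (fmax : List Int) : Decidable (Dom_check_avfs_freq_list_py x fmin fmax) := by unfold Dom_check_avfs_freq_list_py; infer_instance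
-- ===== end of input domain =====

-- One honest line: B fuses A's two membership scans (fmin[0] in x, fmax[0] in x) into the
-- validation loop via seen_min/seen_max flags; alternative decomposition, same return value.

-- ===== PORT A =====
-- loop of A: returns false on the early 'return False', true when the loop finishes
def pvALoop : List Int → Int → Bool
  | [], _ => true
  | f :: r, fprev => if f > 10000000000 ∨ f ≤ fprev then false else pvALoop r f

def check_avfs_freq_list_py (x : List Int) (fmin : List Int) (fmax : List Int) : Bool :=
  if pvALoop x (-1) = false then false
  else if (match fmin with | [] => false | m :: _ => ¬ (m ∈ x)) then false
  else if (match fmax with | [] => false | m :: _ => ¬ (m ∈ x)) then false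
  else true

-- ===== PORT B =====
-- fused loop of B: carries fprev and the pending min/max targets (none = done);
-- the post-loop 'both None' check is the base case
def pvBLoop : List Int → Int → Option Int → Option Int → Bool
  | [], _, want_min, want_max => want_min = none && want_max = none
  | f :: r, fprev, want_min, want_max =>
    if ¬ (fprev < f ∧ f ≤ 10000000000) then false
    else pvBLoop r f
      (if (match want_min with | none => false | some m => f = m) then none else want_min)
      (if (match want_max with | none => false | some m => f = m) then none else want_max)

def check_avfs_freq_list_py_alt (x : List Int) (fmin : List Int) (fmax : List Int) : Bool :=
  pvBLoop x (-1) fmin.head? fmax.head?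

-- ===== PRECONDITION & SPEC =====
def Spec_check_avfs_freq_list_py (x : List Int) (fmin : List Int) (fmax : List Int) (out : Bool) : Prop := out = check_avfs_freq_list_py_alt x fmin fmax
instance (x : List Int) (fmin : List Int) (fmax : List Int) (out : Bool) : Decidable (Spec_check_avfs_freq_list_py x fmin fmax out) := by unfold Spec_check_avfs_freq_list_py; infer_instance

-- ===== CLAIM =====
def Claim_equal_check_avfs_freq_list_py : Prop := ∀ (x : List Int) (fmin : List Int) (fmax : List Int), Dom_check_avfs_freq_list_py x fmin fmax → Spec_check_avfs_freq_list_py x fmin fmax (check_avfs_freq_list_py x fmin fmax)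

-- ===== LEMMAS AND PROOFS =====
-- B's fused loop equals A's loop conjoined with membership of the still-pending
-- targets; a pending 'some m' stands for 'm not yet seen in the consumed prefix'.
theorem pvBLoop_eq (x : List Int) : ∀ (fprev : Int) (wm wx : Option Int),
    pvBLoop x fprev wm wx =
      (pvALoop x fprev &&
        (match wm with | none => true | some m => decide (m ∈ x)) &&
        (match wx with | none => true | some m => decide (m ∈ x))) := by
  induction x with
  | nil =>
    intro fprev wm wx
    cases wm <;> cases wx <;> simp [pvBLoop, pvALoop]
  | cons f r ih =>
    intro fprev wm wx
    by_cases h : ¬ (fprev < f ∧ f ≤ 10000000000)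
    · have h' : f > 10000000000 ∨ f ≤ fprev := by omega
      simp [pvBLoop, pvALoop, h, h']
    · have h' : ¬ (f > 10000000000 ∨ f ≤ fprev) := by omega
      simp only [pvBLoop, pvALoop, if_neg h, if_neg h', ih]
      cases wm with
      | none =>
        cases wx with
        | none => rfl
        | some mx =>
          by_cases hx : f = mx <;> subst_vars <;> simp_all [List.mem_cons, eq_comm]
      | some mn =>
        cases wx with
        | none =>
          by_cases hm : f = mn <;> subst_vars <;> simp_all [List.mem_cons, eq_comm]
        | some mx =>
          by_cases hm : f = mn <;> by_cases hx : f = mx <;> subst_vars <;>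
            simp_all [List.mem_cons, eq_comm]

-- ===== VERDICT =====
theorem check_avfs_freq_list_py_spec : Claim_equal_check_avfs_freq_list_py := by
  intro x fmin fmax _
  unfold Spec_check_avfs_freq_list_py check_avfs_freq_list_py check_avfs_freq_list_py_alt
  rw [pvBLoop_eq]
  cases hA : pvALoop x (-1) with
  | false => simp
  | true => cases fmin <;> cases fmax <;> simp
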